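-- pv_equiv track=rewrite | github.com/jatinthakkar567/python-unit-1 | Convert string to Lowercase  Uppercase Toggle case.py | to_upper
-- ===== SOURCE A (Python) =====
-- def to_upper(s):
--     result = ""
--     for ch in s:
--         if 'a' <= ch <= 'z':
--             result += chr(ord(ch) - 32)
--         else:
--             result += ch
--     return result
-- ===== SOURCE B (Python) =====
-- _TABLE = str.maketrans('abcdefghijklmnopqrstuvwxyz', 'ABCDEFGHIJKLMNOPQRSTUVWXYZ')
--
-- def to_upper(s):
--     return s.translate(_TABLE)
-- ===== Notes on version B (the rewrite author's own statement) =====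
-- stated objective: idiomatic
-- what changed: Replaces the per-character branch-and-concatenate loop with a precomputed 26-entry translation table and a single s.translate(table) call, a table lookup per char in one C-level pass.
import Mathlib
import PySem

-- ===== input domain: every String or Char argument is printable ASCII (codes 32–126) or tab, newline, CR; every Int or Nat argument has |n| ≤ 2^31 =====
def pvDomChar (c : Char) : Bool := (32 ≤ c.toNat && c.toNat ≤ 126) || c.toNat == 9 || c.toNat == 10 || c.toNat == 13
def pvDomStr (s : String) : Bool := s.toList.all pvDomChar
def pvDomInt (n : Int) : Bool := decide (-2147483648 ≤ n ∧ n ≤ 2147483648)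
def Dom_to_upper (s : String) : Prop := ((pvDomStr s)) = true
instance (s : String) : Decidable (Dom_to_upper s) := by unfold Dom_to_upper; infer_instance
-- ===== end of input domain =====

-- B replaces A's per-character compare-and-concatenate loop with a precomputed
-- 26-entry translation table and a single table-driven pass (idiomatic).

-- ===== PORT A =====
-- literal transliteration: result = ""; for ch in s: result += chr(ord(ch)-32) if 'a'<=ch<='z' else ch
def to_upper (s : String) : String :=
  s.toList.foldl
    (fun result ch =>
      if 'a' ≤ ch ∧ ch ≤ 'z' then
        result ++ String.singleton (Char.ofNat (ch.toNat - 32))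
      else
        result ++ String.singleton ch)
    ""

-- ===== PORT B =====
-- the translation table str.maketrans('abcdefghijklmnopqrstuvwxyz', 'ABCDEFGHIJKLMNOPQRSTUVWXYZ')
def pvTable : PySem.Dict Char Char :=
  PySem.Dict.ofList
    (List.zip "abcdefghijklmnopqrstuvwxyz".toList "ABCDEFGHIJKLMNOPQRSTUVWXYZ".toList)

-- s.translate(table): each char replaced by its table entry, chars absent from the table unchanged
def to_upper_alt (s : String) : String :=
  String.ofList (s.toList.map (fun c => pvTable.getD c c))

-- ===== PRECONDITION & SPEC =====
def Spec_to_upper (s : String) (out : String) : Prop := out = to_upper_alt s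
instance (s : String) (out : String) : Decidable (Spec_to_upper s out) := by unfold Spec_to_upper; infer_instance

-- ===== CLAIM (what is proved, stated in full; the proofs are below) =====
def Claim_equal_to_upper : Prop := ∀ (s : String), Dom_to_upper s → Spec_to_upper s (to_upper s)

-- ===== LEMMAS AND PROOFS =====

set_option maxHeartbeats 1000000 in
-- per-character agreement: B's table lookup equals A's branch, for every Char
theorem pvTable_getD_eq (c : Char) :
    pvTable.getD c c =
      (if 'a' ≤ c ∧ c ≤ 'z' then Char.ofNat (c.toNat - 32) else c) := by
  by_cases hm : c ∈ ['a','b','c','d','e','f','g','h','i','j','k','l','m',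
                     'n','o','p','q','r','s','t','u','v','w','x','y','z']
  · fin_cases hm <;> decide
  · have hnc : ¬('a' ≤ c ∧ c ≤ 'z') := by
      rintro ⟨h1, h2⟩
      simp [Char.le_def, UInt32.le_iff_toNat_le] at h1 h2
      have hc' := (Char.ofNat_toNat c).symm
      interval_cases hn : c.toNat <;> (rw [hc'] at hm; exact hm (by decide))
    have hcf : pvTable.contains c = false := by
      have hT : pvTable = PySem.Dict.mk
          [('a', 'A'), ('b', 'B'), ('c', 'C'), ('d', 'D'), ('e', 'E'), ('f', 'F'),
           ('g', 'G'), ('h', 'H'), ('i', 'I'), ('j', 'J'), ('k', 'K'), ('l', 'L'),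
           ('m', 'M'), ('n', 'N'), ('o', 'O'), ('p', 'P'), ('q', 'Q'), ('r', 'R'),
           ('s', 'S'), ('t', 'T'), ('u', 'U'), ('v', 'V'), ('w', 'W'), ('x', 'X'),
           ('y', 'Y'), ('z', 'Z')] := by decide
      rw [hT]
      simp [PySem.Dict.contains_mk]
      simp at hm
      simp only [eq_comm]
      exact hm
    rw [PySem.Dict.getD_of_not_contains pvTable c hcf, if_neg hnc]

-- A's loop with accumulator acc appends exactly B's translated characters
theorem to_upper_foldl (l : List Char) (acc : String) :
    (l.foldl
      (fun result ch =>
        if 'a' ≤ ch ∧ ch ≤ 'z' then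
          result ++ String.singleton (Char.ofNat (ch.toNat - 32))
        else
          result ++ String.singleton ch)
      acc).toList
    = acc.toList ++ l.map (fun c => pvTable.getD c c) := by
  induction l generalizing acc with
  | nil => simp
  | cons ch rest ih =>
    simp only [List.foldl_cons, List.map_cons, ih]
    split_ifs with h
    · simp [pvTable_getD_eq, h]
    · simp [pvTable_getD_eq, h]

-- ===== VERDICT (by name: the statement is the Claim_ definition above) =====
theorem to_upper_spec : Claim_equal_to_upper := by
  intro s _
  unfold Spec_to_upper to_upper to_upper_alt
  apply String.toList_inj.mp
  rw [to_upper_foldl]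
  simp
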